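-- pv_equiv track=rewrite | github.com/Gottiee/asm-obfuscator | src/parser.py | get_prefix
-- ===== SOURCE A (Python) =====
-- def get_prefix(s:str):
-- 	prefix = ""
-- 	for char in s:
-- 		if char in (" ", "\t"):
-- 			prefix += char
-- 		else:
-- 			break
-- 	return prefix
-- ===== SOURCE B (Python) =====
-- def get_prefix(s: str):
--     stripped = s.lstrip(" \t")
--     return s[:len(s) - len(stripped)]
-- ===== Notes on version B (the rewrite author's own statement) =====
-- stated objective: idiomatic
-- what changed: Replaces the explicit char-by-char accumulation loop with a break by deriving the prefix length from a space-and-tab-only lstrip and slicing, with no loop of its own.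
import Mathlib
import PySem

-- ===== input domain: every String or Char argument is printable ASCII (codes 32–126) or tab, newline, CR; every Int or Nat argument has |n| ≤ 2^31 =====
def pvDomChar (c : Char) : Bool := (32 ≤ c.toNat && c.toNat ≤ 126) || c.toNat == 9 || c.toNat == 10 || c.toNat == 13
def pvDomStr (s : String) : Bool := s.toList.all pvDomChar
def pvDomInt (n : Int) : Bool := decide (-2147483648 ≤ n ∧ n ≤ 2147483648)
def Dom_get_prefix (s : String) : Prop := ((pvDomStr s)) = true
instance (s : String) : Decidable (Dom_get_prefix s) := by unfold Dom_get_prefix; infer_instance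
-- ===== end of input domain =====

-- B computes the prefix length via a space-and-tab-only lstrip and one slice instead of A's
-- accumulate-and-break loop (objective: idiomatic; same cost).

-- ===== PORT A =====
-- the for-loop with break: accumulate chars while they are ' ' or '\t', stop at the first other char
def getPrefixLoop (acc : List Char) : List Char → List Char
  | [] => acc
  | c :: rest => if c == ' ' || c == '\t' then getPrefixLoop (acc ++ [c]) rest else acc

def get_prefix (s : String) : String := String.mk (getPrefixLoop [] s.toList)

-- ===== PORT B =====
def get_prefix_alt (s : String) : String :=
  let cs := s.toList
  -- s.lstrip(" \t"): ported by hand as dropWhile over the chars (exact: Python drops exactly the leading chars that are in " \t")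
  let stripped := cs.dropWhile (fun c => c == ' ' || c == '\t')
  -- s[:len(s) - len(stripped)]
  String.mk (PySem.List.slice cs none (some ((cs.length : Int) - (stripped.length : Int))))

-- ===== PRECONDITION & SPEC =====
def Spec_get_prefix (s : String) (out : String) : Prop := out = get_prefix_alt s
instance (s : String) (out : String) : Decidable (Spec_get_prefix s out) := by unfold Spec_get_prefix; infer_instance

-- ===== CLAIM (what is proved, stated in full; the proofs are below) =====
def Claim_equal_get_prefix : Prop := ∀ (s : String), Dom_get_prefix s → Spec_get_prefix s (get_prefix s)

-- ===== LEMMAS AND PROOFS =====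

theorem getPrefixLoop_eq_takeWhile (acc cs : List Char) :
    getPrefixLoop acc cs = acc ++ cs.takeWhile (fun c => c == ' ' || c == '\t') := by
  induction cs generalizing acc with
  | nil => simp [getPrefixLoop]
  | cons c rest ih =>
    by_cases h : (c == ' ' || c == '\t') = true
    · simp [getPrefixLoop, h, ih]
    · simp [getPrefixLoop, h]

theorem take_len_takeWhile (p : Char → Bool) (l : List Char) :
    l.take (l.takeWhile p).length = l.takeWhile p := by
  induction l with
  | nil => simp
  | cons c t ih => by_cases h : p c <;> simp [h, ih]

-- ===== VERDICT (by name: the statement is the Claim_ definition above) =====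
theorem get_prefix_spec : Claim_equal_get_prefix := by
  intro s _
  unfold Spec_get_prefix get_prefix get_prefix_alt
  set p : Char → Bool := fun c => c == ' ' || c == '\t' with hp
  have hlen : (s.toList.dropWhile p).length ≤ s.toList.length :=
    List.length_dropWhile_le _ _
  have hsub : ((s.toList.length : Int) - ((s.toList.dropWhile p).length : Int))
      = (((s.toList.length - (s.toList.dropWhile p).length : Nat)) : Int) := by
    omega
  rw [getPrefixLoop_eq_takeWhile]
  simp only [List.nil_append, hsub, PySem.List.slice_to_natCast]
  congr 1
  have hlen2 : s.toList.length - (s.toList.dropWhile p).length = (s.toList.takeWhile p).length := by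
    have := List.takeWhile_append_dropWhile (p := p) (l := s.toList)
    have hl : (s.toList.takeWhile p).length + (s.toList.dropWhile p).length = s.toList.length := by
      rw [← List.length_append, this]
    omega
  rw [hlen2]
  exact (take_len_takeWhile p s.toList).symm
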